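-- pv_equiv track=rewrite | github.com/Asmita-Zjigyasu/Snakes-and-Ladders-in-Python | SnakeNLadders_full_with_music.py | generate_coords
-- ===== SOURCE A (Python) =====
-- def generate_coords(s):
--     coords = []
--     for y in range(100, 500, 40):
--         row = []
--         for x in range(200, 600, 40):
--             row.append((x, y))
--         if ((y - 100) / 40) % 2 != 0:
--             row.sort(reverse=True)
--         coords.extend(row)
--     return coords[100 - s]
-- ===== SOURCE B (Python) =====
-- def generate_coords(s):
--     # Direct arithmetic: square s sits at boustrophedon position 100 - s
--     # (Python-style mod handles the negative-index wraparound of A's list lookup).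
--     i = (100 - s) % 100
--     row, col = divmod(i, 10)
--     y = 100 + 40 * row
--     x = 200 + 40 * col if row % 2 == 0 else 200 + 40 * (9 - col)
--     return (x, y)
-- ===== Notes on version B (the rewrite author's own statement) =====
-- stated objective: faster
-- what changed: B computes the single requested coordinate by closed-form row/column arithmetic (Python-mod position, floor-divide into row and column, boustrophedon column flip on odd rows) instead of building and sorting the whole grid and then indexing into it.
import Mathlib
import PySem

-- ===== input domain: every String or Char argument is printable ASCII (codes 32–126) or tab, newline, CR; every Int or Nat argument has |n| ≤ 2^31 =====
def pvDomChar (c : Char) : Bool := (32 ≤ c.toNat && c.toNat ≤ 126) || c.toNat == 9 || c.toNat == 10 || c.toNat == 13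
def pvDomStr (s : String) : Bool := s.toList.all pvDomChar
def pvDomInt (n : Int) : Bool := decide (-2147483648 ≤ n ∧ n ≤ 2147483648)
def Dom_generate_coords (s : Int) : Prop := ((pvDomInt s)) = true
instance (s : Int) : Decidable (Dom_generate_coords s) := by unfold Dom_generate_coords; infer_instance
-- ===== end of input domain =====

-- B replaces A's build-the-whole-100-cell-grid-then-index with O(1) closed-form row/column arithmetic.


-- ===== PORT A =====
-- The grid A's loop builds (independent of s).  In each row all y are equal, so
-- Python's reverse lexicographic tuple sort equals sorting by the x component;
-- (y - 100) / 40 is exact (true division of a multiple), so floordiv is exact here.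
def pvGridA : List (Int × Int) :=
  (PySem.List.pyRange 100 500 40).foldl (fun coords y =>
    let row := (PySem.List.pyRange 200 600 40).foldl (fun row x => row ++ [(x, y)]) []
    let row := if PySem.Int.mod (PySem.Int.floordiv (y - 100) 40) 2 ≠ 0
               then PySem.List.sorted row (fun p => p.1) true
               else row
    coords ++ row) []

def generate_coords (s : Int) : Int × Int :=
  (PySem.List.pyGet? pvGridA (100 - s)).getD (0, 0)   -- none = IndexError, excluded by Pre_

-- ===== PORT B =====
def generate_coords_alt (s : Int) : Int × Int :=
  let i := PySem.Int.mod (100 - s) 100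
  let row := PySem.Int.floordiv i 10
  let col := PySem.Int.mod i 10
  let y := 100 + 40 * row
  let x := if PySem.Int.mod row 2 = 0 then 200 + 40 * col else 200 + 40 * (9 - col)
  (x, y)

-- ===== PRECONDITION & SPEC =====
-- Pre_: exactly the s for which A's list index 100 - s is in range (no IndexError).
def Pre_generate_coords (s : Int) : Prop := 1 ≤ s ∧ s ≤ 200
instance (s : Int) : Decidable (Pre_generate_coords s) := by unfold Pre_generate_coords; infer_instance
def pvWitness_generate_coords : Int := 7

def Spec_generate_coords (s : Int) (out : Int × Int) : Prop := out = generate_coords_alt s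
instance (s : Int) (out : Int × Int) : Decidable (Spec_generate_coords s out) := by unfold Spec_generate_coords; infer_instance

-- ===== CLAIM (what is proved, stated in full; the proofs are below) =====
def Claim_equal_generate_coords : Prop := ∀ (s : Int), Dom_generate_coords s → Pre_generate_coords s → Spec_generate_coords s (generate_coords s)

-- ===== LEMMAS AND PROOFS =====
set_option maxRecDepth 4000 in
theorem pv_agree_on_range :
    ∀ s ∈ PySem.List.pyRange 1 201 1, generate_coords s = generate_coords_alt s := by
  decide

-- ===== VERDICT (by name: the statement is the Claim_ definition above) =====
theorem generate_coords_spec : Claim_equal_generate_coords := by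
  intro s _ hpre
  obtain ⟨h1, h2⟩ := hpre
  show generate_coords s = generate_coords_alt s
  exact pv_agree_on_range s (by
    rw [PySem.List.mem_pyRange_one]
    exact ⟨h1, by omega⟩)
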